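-- pv_equiv track=rewrite | github.com/ld0574/BeancountPilot | src/api/routes/ai_config.py | _resolve_default_profile_id
-- ===== SOURCE A (Python) =====
-- from typing import Any, Dict, List
--
-- PROVIDER_TYPES = ["deepseek", "openai", "ollama", "custom"]
--
-- def _resolve_default_profile_id(profiles: List[Dict[str, Any]], ref: str) -> str:
--     """Resolve default id from profile id or provider type."""
--     if not profiles:
--         return ""
--
--     if ref and any(p["id"] == ref for p in profiles):
--         return ref
--
--     if ref and ref in PROVIDER_TYPES:
--         for profile in profiles:
--             if profile["provider"] == ref:
--                 return profile["id"]
--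
--     return profiles[0]["id"]
-- ===== SOURCE B (Python) =====
-- from typing import Any, Dict, List
--
-- PROVIDER_TYPES = ["deepseek", "openai", "ollama", "custom"]
--
-- def _resolve_default_profile_id(profiles: List[Dict[str, Any]], ref: str) -> str:
--     """Single pass: track first id, whether any id equals ref, and the first
--     provider match (providers read only when ref is a provider type)."""
--     scan_provider = bool(ref) and ref in PROVIDER_TYPES
--     first_id = None
--     id_match = False
--     provider_id = None
--     for p in profiles:
--         pid = p["id"]
--         if first_id is None:
--             first_id = pid
--         if pid == ref:
--             id_match = True
--         if scan_provider and provider_id is None and p["provider"] == ref: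
--             provider_id = pid
--     if first_id is None:
--         return ""
--     if ref and id_match:
--         return ref
--     if provider_id is not None:
--         return provider_id
--     return first_id
-- ===== Notes on version B (the rewrite author's own statement) =====
-- stated objective: alternative
-- what changed: Replaces A's up-to-three sequential short-circuiting scans (id match, provider match, head fallback) with one fold over the profiles that tracks the first id, an id-match flag and the first provider match, deciding the result after the loop.
-- outside the precondition, e.g. on _resolve_default_profile_id([{'id': 'a'}, {}], ''): A returns 'a', B raises KeyError; on _resolve_default_profile_id([{'id': 'openai'}, {'id': 'b'}], 'openai'): A returns 'openai', B raises KeyError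
import Mathlib
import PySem

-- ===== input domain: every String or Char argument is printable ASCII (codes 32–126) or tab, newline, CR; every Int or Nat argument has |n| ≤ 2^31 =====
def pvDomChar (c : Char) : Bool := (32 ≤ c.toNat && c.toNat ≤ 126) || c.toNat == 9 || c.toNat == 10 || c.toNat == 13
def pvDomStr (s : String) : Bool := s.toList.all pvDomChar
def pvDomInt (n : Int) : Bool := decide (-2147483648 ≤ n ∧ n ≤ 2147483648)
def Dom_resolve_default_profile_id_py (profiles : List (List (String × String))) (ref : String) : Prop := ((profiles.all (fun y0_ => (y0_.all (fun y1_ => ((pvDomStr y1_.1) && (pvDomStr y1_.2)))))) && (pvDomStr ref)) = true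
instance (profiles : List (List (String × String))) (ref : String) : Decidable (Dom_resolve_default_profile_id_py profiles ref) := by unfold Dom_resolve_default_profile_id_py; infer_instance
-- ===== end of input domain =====

-- B: one fold tracking first id / id-match flag / first provider match, instead of A's three sequential scans (alternative decomposition, same cost).
-- Equivalence is about the RETURN value on Pre_ (where neither Python raises KeyError).

-- exact Python dict lookup on the association-list encoding: first matching key
def pvGetKey : List (String × String) → String → Option String
  | [], _ => none
  | (k, v) :: rest, key => if k == key then some v else pvGetKey rest key

def PROVIDER_TYPES : List String := ["deepseek", "openai", "ollama", "custom"]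

-- ===== PORT A =====
-- A's provider for-loop with early return: first profile whose "provider" == ref, yielding its "id"
def pvAProviderLoop (profiles : List (List (String × String))) (ref : String) : Option String :=
  match profiles with
  | [] => none
  | p :: rest =>
      if (pvGetKey p "provider").getD "" = ref then some ((pvGetKey p "id").getD "")
      else pvAProviderLoop rest ref

def resolve_default_profile_id_py (profiles : List (List (String × String))) (ref : String) : String :=
  if profiles = [] then ""
  else if ref ≠ "" ∧ profiles.any (fun p => (pvGetKey p "id").getD "" == ref) then ref
  else
    match (if ref ≠ "" ∧ ref ∈ PROVIDER_TYPES then pvAProviderLoop profiles ref else none) with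
    | some pid => pid
    | none => (pvGetKey (profiles.headD []) "id").getD ""

-- ===== PORT B =====
-- state: (first_id, id_match, provider_id)
def pvBStep (ref : String) (scanProv : Bool) (st : Option String × Bool × Option String)
    (p : List (String × String)) : Option String × Bool × Option String :=
  let pid := (pvGetKey p "id").getD ""
  let first := match st.1 with | none => some pid | some f => some f
  let idm := st.2.1 || (pid == ref)
  let prov := match st.2.2 with
    | some v => some v
    | none => if scanProv && ((pvGetKey p "provider").getD "" == ref) then some pid else none
  (first, idm, prov)

def resolve_default_profile_id_py_alt (profiles : List (List (String × String))) (ref : String) : String :=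
  let scanProv := (!(ref == "")) && PROVIDER_TYPES.contains ref
  match profiles.foldl (pvBStep ref scanProv) (none, false, none) with
  | (none, _, _) => ""
  | (some f, idm, prov) =>
      if ref ≠ "" ∧ idm = true then ref
      else match prov with
           | some v => v
           | none => f

-- ===== PRECONDITION & SPEC =====
-- Pre_ excludes profile lists in which some dict lacks the "id" key, or lacks the "provider"
-- key while ref is a provider type: there either Python raises KeyError, or A returns only by
-- the accident of its scans' short-circuit order while B (one pass) raises KeyError.
def Pre_resolve_default_profile_id_py (profiles : List (List (String × String))) (ref : String) : Prop :=
  (∀ p ∈ profiles, "id" ∈ p.map Prod.fst) ∧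
  (ref ∈ PROVIDER_TYPES → ∀ p ∈ profiles, "provider" ∈ p.map Prod.fst)
instance (profiles : List (List (String × String))) (ref : String) : Decidable (Pre_resolve_default_profile_id_py profiles ref) := by unfold Pre_resolve_default_profile_id_py; infer_instance

def pvWitness_resolve_default_profile_id_py : (List (List (String × String))) × String :=
  ([[("id", "a"), ("provider", "openai")], [("id", "b"), ("provider", "deepseek")]], "deepseek")

def Spec_resolve_default_profile_id_py (profiles : List (List (String × String))) (ref : String) (out : String) : Prop := out = resolve_default_profile_id_py_alt profiles ref
instance (profiles : List (List (String × String))) (ref : String) (out : String) : Decidable (Spec_resolve_default_profile_id_py profiles ref out) := by unfold Spec_resolve_default_profile_id_py; infer_instance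

-- ===== CLAIM (what is proved, stated in full; the proofs are below) =====
def Claim_equal_resolve_default_profile_id_py : Prop := ∀ (profiles : List (List (String × String))) (ref : String), Dom_resolve_default_profile_id_py profiles ref → Pre_resolve_default_profile_id_py profiles ref → Spec_resolve_default_profile_id_py profiles ref (resolve_default_profile_id_py profiles ref)

-- ===== LEMMAS AND PROOFS =====

-- characterisation of B's fold state
theorem pvB_foldl_char (ref : String) (scanProv : Bool) :
    ∀ (profiles : List (List (String × String))) (st : Option String × Bool × Option String),
    profiles.foldl (pvBStep ref scanProv) st =
      ((match st.1 with
        | none => (profiles.head?).map (fun p => (pvGetKey p "id").getD "")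
        | some f => some f),
       st.2.1 || profiles.any (fun p => (pvGetKey p "id").getD "" == ref),
       (match st.2.2 with
        | none => if scanProv then pvAProviderLoop profiles ref else none
        | some v => some v)) := by
  intro profiles
  induction profiles with
  | nil =>
    intro st
    rcases st with ⟨f, idm, prov⟩
    cases f <;> cases prov <;> simp [pvAProviderLoop]
  | cons p rest ih =>
    intro st
    rcases st with ⟨f, idm, prov⟩
    rw [List.foldl_cons, ih]
    simp only [pvBStep, pvAProviderLoop, List.head?_cons, List.any_cons, Option.map_some]
    refine Prod.ext ?_ (Prod.ext ?_ ?_)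
    · cases f <;> simp
    · simp [Bool.or_assoc]
    · cases prov with
      | some v => simp
      | none =>
        simp only
        by_cases hs : scanProv = true
        · subst hs
          by_cases hm : (pvGetKey p "provider").getD "" = ref
          · simp [hm]
          · simp [hm]
        · simp at hs; subst hs; simp

theorem resolve_eq (profiles : List (List (String × String))) (ref : String) :
    resolve_default_profile_id_py profiles ref = resolve_default_profile_id_py_alt profiles ref := by
  unfold resolve_default_profile_id_py resolve_default_profile_id_py_alt
  simp only [pvB_foldl_char]
  cases profiles with
  | nil => simp
  | cons p rest =>
    simp only [List.head?_cons, Option.map_some, List.headD_cons, reduceCtorEq, if_false,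
      Bool.false_or]
    by_cases h1 : ref ≠ "" ∧ (List.any (p :: rest) fun q => (pvGetKey q "id").getD "" == ref) = true
    · rw [if_pos h1, if_pos h1]
    · rw [if_neg h1, if_neg h1]
      have hiff : (ref ≠ "" ∧ ref ∈ PROVIDER_TYPES) ↔ ((!(ref == "")) && PROVIDER_TYPES.contains ref) = true := by
        simp
      by_cases h2 : ref ≠ "" ∧ ref ∈ PROVIDER_TYPES
      · rw [if_pos h2, if_pos (hiff.mp h2)]
      · rw [if_neg h2, if_neg (fun hc => h2 (hiff.mpr hc))]

-- ===== VERDICT (by name: the statement is the Claim_ definition above) =====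
theorem resolve_default_profile_id_py_spec : Claim_equal_resolve_default_profile_id_py := by
  intro profiles ref _ _
  unfold Spec_resolve_default_profile_id_py
  exact resolve_eq profiles ref
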